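-- pv_equiv track=rewrite | github.com/TheFactoryX/campbells-soup-cans | warehouse/can_2247_20260215-19h.py | build_box_lines
-- ===== SOURCE A (Python) =====
-- RESET = "\033[0m"
--
-- FG = {
--     "black": "\033[30m",
--     "red": "\033[31m",
--     "green": "\033[32m",
--     "yellow": "\033[33m",
--     "blue": "\033[34m",
--     "magenta": "\033[35m",
--     "cyan": "\033[36m",
--     "white": "\033[37m",
--     "bright_black": "\033[90m",
--     "bright_red": "\033[91m",
--     "bright_green": "\033[92m",
--     "bright_yellow": "\033[93m",
--     "bright_blue": "\033[94m",
--     "bright_magenta": "\033[95m",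
--     "bright_cyan": "\033[96m",
--     "bright_white": "\033[97m",
-- }
--
-- def make_border(inner_w, phase):
--     # Flickering neon border
--     neon = [FG["bright_yellow"], FG["bright_magenta"], FG["bright_cyan"], FG["bright_white"]]
--     c1 = neon[phase % len(neon)]
--     c2 = neon[(phase + 2) % len(neon)]
--     pat = ("▓░" if phase % 2 == 0 else "▒▓")
--     left = pat[0]
--     right = pat[1]
--     top = f"{c1}" + "╔" + ("═" * inner_w) + "╗" + f"{RESET}"
--     side_l = f"{c2}║{RESET}"
--     side_r = f"{c2}║{RESET}"
--     bottom = f"{c1}" + "╚" + ("═" * inner_w) + "╝" + f"{RESET}"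
--     return top, side_l, side_r, bottom
--
-- def build_box_lines(w, h, text_lines, inner_w, phase, reveal_chars):
--     # Box with typewriter reveal across multiple lines
--     max_lines = len(text_lines)
--     lens = [len(s) for s in text_lines]
--     cum = [0]
--     for L in lens:
--         cum.append(cum[-1] + L)
--     total_chars = cum[-1]
--     # Compute how many chars to reveal
--     k = min(reveal_chars, total_chars)
--
--     top, side_l, side_r, bottom = make_border(inner_w, phase)
--
--     box = []
--     box.append(top)
--     # Prepare lines with padding and partial reveal
--     for i, line in enumerate(text_lines):
--         begin = cum[i]
--         end = cum[i+1]
--         show = min(max(k - begin, 0), lens[i])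
--         visible = line[:show]
--         hidden_spaces = " " * (lens[i] - show)
--         # blinking caret if next to reveal is on this line
--         caret = ""
--         if show < lens[i] and k >= begin and k < end and phase % 2 == 0:
--             caret = FG["bright_black"] + "▌" + RESET
--         pad_lr = inner_w - lens[i]
--         left_pad = pad_lr // 2
--         right_pad = pad_lr - left_pad
--         row = side_l + " " * left_pad + visible + hidden_spaces + caret + " " * max(0, right_pad - len(caret)) + side_r
--         box.append(row)
--     box.append(bottom)
--     return box
-- ===== SOURCE B (Python) =====
-- RESET = "\033[0m"
--
-- FG = {
--     "black": "\033[30m",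
--     "red": "\033[31m",
--     "green": "\033[32m",
--     "yellow": "\033[33m",
--     "blue": "\033[34m",
--     "magenta": "\033[35m",
--     "cyan": "\033[36m",
--     "white": "\033[37m",
--     "bright_black": "\033[90m",
--     "bright_red": "\033[91m",
--     "bright_green": "\033[92m",
--     "bright_yellow": "\033[93m",
--     "bright_blue": "\033[94m",
--     "bright_magenta": "\033[95m",
--     "bright_cyan": "\033[96m",
--     "bright_white": "\033[97m",
-- }
--
-- def make_border(inner_w, phase):
--     neon = [FG["bright_yellow"], FG["bright_magenta"], FG["bright_cyan"], FG["bright_white"]]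
--     c1 = neon[phase % len(neon)]
--     c2 = neon[(phase + 2) % len(neon)]
--     pat = ("▓░" if phase % 2 == 0 else "▒▓")
--     left = pat[0]
--     right = pat[1]
--     top = f"{c1}" + "╔" + ("═" * inner_w) + "╗" + f"{RESET}"
--     side_l = f"{c2}║{RESET}"
--     side_r = f"{c2}║{RESET}"
--     bottom = f"{c1}" + "╚" + ("═" * inner_w) + "╝" + f"{RESET}"
--     return top, side_l, side_r, bottom
--
-- def build_box_lines(w, h, text_lines, inner_w, phase, reveal_chars):
--     # Single pass: a signed running counter rem replaces the lens/cum prefix tables.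
--     rem = min(reveal_chars, sum(len(s) for s in text_lines))
--     top, side_l, side_r, bottom = make_border(inner_w, phase)
--     rows = [top]
--     for line in text_lines:
--         n = len(line)
--         show = min(max(rem, 0), n)
--         caret = FG["bright_black"] + "▌" + RESET if (0 <= rem < n and phase % 2 == 0) else ""
--         lp = (inner_w - n) // 2
--         rp = (inner_w - n) - lp
--         rows.append(side_l + " " * lp + (line[:show] + " " * (n - show)) + caret
--                     + " " * max(0, rp - len(caret)) + side_r)
--         rem -= n
--     rows.append(bottom)
--     return rows
-- ===== Notes on version B (the rewrite author's own statement) =====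
-- stated objective: simpler
-- what changed: Replaced the precomputed lens list and cum prefix-sum table (with per-line indexing into them) by a single signed running counter rem threaded through one pass over the lines; the caret test collapses to 0 <= rem < len(line).
import Mathlib
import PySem

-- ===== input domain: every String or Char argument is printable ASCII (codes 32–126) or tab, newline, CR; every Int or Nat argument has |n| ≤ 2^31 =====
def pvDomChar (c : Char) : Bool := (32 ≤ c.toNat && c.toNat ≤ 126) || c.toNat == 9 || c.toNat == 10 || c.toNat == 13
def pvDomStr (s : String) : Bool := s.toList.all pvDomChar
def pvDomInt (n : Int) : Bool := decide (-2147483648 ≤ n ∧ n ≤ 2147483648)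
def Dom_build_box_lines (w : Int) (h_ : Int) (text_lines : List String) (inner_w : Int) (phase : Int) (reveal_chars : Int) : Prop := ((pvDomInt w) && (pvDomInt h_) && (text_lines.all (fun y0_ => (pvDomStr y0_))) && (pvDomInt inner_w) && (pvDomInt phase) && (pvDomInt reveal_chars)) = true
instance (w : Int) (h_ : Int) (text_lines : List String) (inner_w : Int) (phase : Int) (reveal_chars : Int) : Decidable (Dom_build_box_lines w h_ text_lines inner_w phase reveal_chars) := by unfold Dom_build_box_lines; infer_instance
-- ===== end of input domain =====

-- B replaces A's lens list and cum prefix-sum table by one signed running counter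
-- threaded through a single pass; same output (objective: simpler).

-- ===== PORT A =====
-- Shared module constants/helpers (both Pythons use the same module-level make_border).
-- Strings are handled as List Char (PySem.Chars level) and packed with String.mk at the
-- end; Python's `s * n` (n possibly ≤ 0 gives "") is List.replicate n.toNat — exact.
def pvRESET : List Char := "\x1b[0m".toList
def pvCaret : List Char := "\x1b[90m".toList ++ "▌".toList ++ pvRESET   -- FG["bright_black"] + "▌" + RESET
def pvNeon : List (List Char) :=
  ["\x1b[93m".toList, "\x1b[95m".toList, "\x1b[96m".toList, "\x1b[97m".toList]

def pv_make_border (inner_w : Int) (phase : Int) :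
    List Char × List Char × List Char × List Char :=
  let neon := pvNeon
  let c1 := PySem.List.pyGetD neon (PySem.Int.mod phase 4) []
  let c2 := PySem.List.pyGetD neon (PySem.Int.mod (phase + 2) 4) []
  let pat := if PySem.Int.mod phase 2 = 0 then "▓░".toList else "▒▓".toList
  let _left := PySem.List.pyGetD pat 0 ' '     -- computed by the Python, never used
  let _right := PySem.List.pyGetD pat 1 ' '
  let top := c1 ++ "╔".toList ++ List.replicate inner_w.toNat '═' ++ "╗".toList ++ pvRESET
  let side_l := c2 ++ "║".toList ++ pvRESET
  let side_r := c2 ++ "║".toList ++ pvRESET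
  let bottom := c1 ++ "╚".toList ++ List.replicate inner_w.toNat '═' ++ "╝".toList ++ pvRESET
  (top, side_l, side_r, bottom)

-- body of A's `for i, line in enumerate(text_lines)` loop, named so the proofs can cite it
def pvStepA (cum lens : List Int) (k inner_w phase : Int) (side_l side_r : List Char)
    (box : List (List Char)) (p : Int × String) : List (List Char) :=
  let i := p.1
  let line := p.2.toList
  let begin_ := PySem.List.pyGetD cum i 0
  let end_ := PySem.List.pyGetD cum (i + 1) 0
  let li := PySem.List.pyGetD lens i 0
  let show_ := min (max (k - begin_) 0) li
  let visible := PySem.List.slice line none (some show_)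
  let hidden_spaces := List.replicate (li - show_).toNat ' '
  let caret : List Char :=
    if show_ < li ∧ begin_ ≤ k ∧ k < end_ ∧ PySem.Int.mod phase 2 = 0 then pvCaret else []
  let pad_lr := inner_w - li
  let left_pad := PySem.Int.floordiv pad_lr 2
  let right_pad := pad_lr - left_pad
  let row := side_l ++ List.replicate left_pad.toNat ' ' ++ visible ++ hidden_spaces
      ++ caret ++ List.replicate (max 0 (right_pad - (caret.length : Int))).toNat ' ' ++ side_r
  box ++ [row]

def build_box_lines (w : Int) (h_ : Int) (text_lines : List String) (inner_w : Int) (phase : Int) (reveal_chars : Int) : List String :=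
  let _max_lines : Int := text_lines.length     -- computed by the Python, never used
  let lens : List Int := text_lines.map (fun s => PySem.Str.len s)
  let cum : List Int :=
    lens.foldl (fun cum L => cum ++ [PySem.List.pyGetD cum (-1) 0 + L]) [0]
  let total_chars := PySem.List.pyGetD cum (-1) 0
  let k := min reveal_chars total_chars
  let border := pv_make_border inner_w phase
  let top := border.1
  let side_l := border.2.1
  let side_r := border.2.2.1
  let bottom := border.2.2.2
  let box : List (List Char) := [top]
  let box := (PySem.List.enumerate text_lines 0).foldl
    (pvStepA cum lens k inner_w phase side_l side_r) box
  let box := box ++ [bottom]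
  box.map String.mk

-- ===== PORT B =====
-- body of B's single-pass loop; the second state component is the running counter rem
def pvStepB (inner_w phase : Int) (side_l side_r : List Char)
    (st : List (List Char) × Int) (line : String) : List (List Char) × Int :=
  let n := PySem.Str.len line
  let rem := st.2
  let show_ := min (max rem 0) n
  let caret : List Char :=
    if 0 ≤ rem ∧ rem < n ∧ PySem.Int.mod phase 2 = 0 then pvCaret else []
  let lp := PySem.Int.floordiv (inner_w - n) 2
  let rp := (inner_w - n) - lp
  let row := side_l ++ List.replicate lp.toNat ' '
      ++ (line.toList.take show_.toNat ++ List.replicate (n - show_).toNat ' ') ++ caret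
      ++ List.replicate (max 0 (rp - (caret.length : Int))).toNat ' ' ++ side_r
  (st.1 ++ [row], rem - n)

def build_box_lines_alt (w : Int) (h_ : Int) (text_lines : List String) (inner_w : Int) (phase : Int) (reveal_chars : Int) : List String :=
  let rem0 := min reveal_chars (text_lines.map (fun s => PySem.Str.len s)).sum
  let border := pv_make_border inner_w phase
  let top := border.1
  let side_l := border.2.1
  let side_r := border.2.2.1
  let bottom := border.2.2.2
  let st := text_lines.foldl (pvStepB inner_w phase side_l side_r) ([top], rem0)
  (st.1 ++ [bottom]).map String.mk

-- ===== PRECONDITION & SPEC =====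
def Spec_build_box_lines (w : Int) (h_ : Int) (text_lines : List String) (inner_w : Int) (phase : Int) (reveal_chars : Int) (out : List String) : Prop := out = build_box_lines_alt w h_ text_lines inner_w phase reveal_chars
instance (w : Int) (h_ : Int) (text_lines : List String) (inner_w : Int) (phase : Int) (reveal_chars : Int) (out : List String) : Decidable (Spec_build_box_lines w h_ text_lines inner_w phase reveal_chars out) := by unfold Spec_build_box_lines; infer_instance

-- ===== CLAIM (what is proved, stated in full; the proofs are below) =====
def Claim_equal_build_box_lines : Prop := ∀ (w : Int) (h_ : Int) (text_lines : List String) (inner_w : Int) (phase : Int) (reveal_chars : Int), Dom_build_box_lines w h_ text_lines inner_w phase reveal_chars → Spec_build_box_lines w h_ text_lines inner_w phase reveal_chars (build_box_lines w h_ text_lines inner_w phase reveal_chars)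

-- ===== LEMMAS AND PROOFS =====

-- A's cum-building fold, characterized: starting from c ++ [s] it appends the running sums.
theorem pv_cum_spec (lens : List Int) : ∀ (c : List Int) (s : Int),
    lens.foldl (fun cum L => cum ++ [PySem.List.pyGetD cum (-1) 0 + L]) (c ++ [s])
      = c ++ (List.range (lens.length + 1)).map (fun i => s + ((lens.take i).sum)) := by
  induction lens with
  | nil => intro c s; simp
  | cons L ls ih =>
    intro c s
    have h1 : PySem.List.pyGetD (c ++ [s]) (-1) 0 = s :=
      PySem.List.pyGetD_neg_one_append_singleton c s 0
    simp only [List.foldl_cons, h1]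
    rw [ih (c ++ [s]) (s + L)]
    conv_rhs => rw [List.range_succ_eq_map]
    simp [List.map_map, Function.comp_def, List.take_succ_cons, add_assoc]

theorem pv_cum_eq (lens : List Int) :
    lens.foldl (fun cum L => cum ++ [PySem.List.pyGetD cum (-1) 0 + L]) [0]
      = (List.range (lens.length + 1)).map (fun i => (lens.take i).sum) := by
  simpa using pv_cum_spec lens [] 0

theorem pv_total_eq (lens : List Int) :
    PySem.List.pyGetD ((List.range (lens.length + 1)).map (fun i => (lens.take i).sum)) (-1) 0
      = lens.sum := by
  rw [List.range_succ, List.map_append]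
  simpa using PySem.List.pyGetD_neg_one_append_singleton
    ((List.range lens.length).map (fun i => (lens.take i).sum)) lens.sum 0

theorem pv_cum_get (lens : List Int) (j : Nat) (hj : j ≤ lens.length) :
    PySem.List.pyGetD ((List.range (lens.length + 1)).map (fun i => (lens.take i).sum)) (j : Int) 0
      = (lens.take j).sum := by
  rw [PySem.List.pyGetD_natCast]
  exact PySem.List.getD_map_range (fun i => (lens.take i).sum) (lens.length + 1) j 0 (by omega)

-- one step of A at index |pre| equals one step of B with rem = k - (chars already consumed)
theorem pv_step_eq (pre : List String) (x : String) (post : List String)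
    (k inner_w phase : Int) (side_l side_r : List Char) (acc : List (List Char)) :
    pvStepB inner_w phase side_l side_r (acc, k - ((pre.map (fun s => PySem.Str.len s)).sum)) x
      = (pvStepA
          ((List.range (((pre ++ x :: post).map (fun s => PySem.Str.len s)).length + 1)).map
            (fun i => ((((pre ++ x :: post).map (fun s => PySem.Str.len s)).take i).sum)))
          ((pre ++ x :: post).map (fun s => PySem.Str.len s)) k inner_w phase side_l side_r
          acc ((pre.length : Int), x),
         k - ((pre.map (fun s => PySem.Str.len s)).sum) - PySem.Str.len x) := by
  set lens := (pre ++ x :: post).map (fun s => PySem.Str.len s) with hlens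
  set S := ((pre.map (fun s => PySem.Str.len s)).sum) with hS
  set n := PySem.Str.len x with hn
  have htake : lens.take pre.length = pre.map (fun s => PySem.Str.len s) := by
    rw [hlens, List.map_append]
    exact List.take_left' (by simp)
  have htake1 : lens.take (pre.length + 1) = (pre ++ [x]).map (fun s => PySem.Str.len s) := by
    rw [hlens, List.append_cons pre x post, List.map_append]
    exact List.take_left' (by simp)
  have hlx : PySem.List.pyGetD lens ((pre.length : Int)) 0 = n := by
    rw [PySem.List.pyGetD_natCast]
    simp [hlens, hn, List.map_append]
  have hb : PySem.List.pyGetD ((List.range (lens.length + 1)).map (fun i => ((lens.take i).sum))) ((pre.length : Int)) 0 = S := by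
    rw [pv_cum_get lens pre.length (by simp [hlens]), htake]
  have he : PySem.List.pyGetD ((List.range (lens.length + 1)).map (fun i => ((lens.take i).sum))) ((pre.length : Int) + 1) 0 = S + n := by
    rw [show ((pre.length : Int) + 1) = ((pre.length + 1 : Nat) : Int) by push_cast; ring,
        pv_cum_get lens (pre.length + 1) (by simp [hlens]), htake1]
    simp [List.map_append, hS, hn]
  have hn0 : 0 ≤ n := by rw [hn, PySem.Str.len_eq]; positivity
  unfold pvStepA pvStepB
  simp only [hb, he, hlx]
  have hcond : (min (max (k - S) 0) n < n ∧ S ≤ k ∧ k < S + n ∧ PySem.Int.mod phase 2 = 0)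
      ↔ (0 ≤ k - S ∧ k - S < n ∧ PySem.Int.mod phase 2 = 0) := by
    constructor
    · rintro ⟨h1, h2, h3, h4⟩; exact ⟨by omega, by omega, h4⟩
    · rintro ⟨h1, h2, h3⟩; exact ⟨by omega, by omega, by omega, h3⟩
  have hslice : PySem.List.slice x.toList none (some (min (max (k - S) 0) n))
      = x.toList.take (min (max (k - S) 0) n).toNat := by
    conv_lhs => rw [show (min (max (k - S) 0) n) = (((min (max (k - S) 0) n).toNat : Nat) : Int) by omega]
    rw [PySem.List.slice_to_natCast]
  rw [hslice]
  by_cases hc : 0 ≤ k - S ∧ k - S < n ∧ PySem.Int.mod phase 2 = 0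
  · rw [if_pos hc, if_pos (hcond.mpr hc)]
    simp [List.append_assoc, hn, PySem.Str.len_eq]
  · rw [if_neg hc, if_neg (fun h => hc (hcond.mp h))]
    simp [List.append_assoc, hn, PySem.Str.len_eq]

-- the two per-line loops agree on any suffix, for any common accumulator
theorem pv_loop_eq (tls : List String) (k inner_w phase : Int) (side_l side_r : List Char) :
    ∀ (ls pre : List String), tls = pre ++ ls → ∀ (acc : List (List Char)),
    (PySem.List.enumerate ls (pre.length : Int)).foldl
      (pvStepA
        ((List.range ((tls.map (fun s => PySem.Str.len s)).length + 1)).map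
          (fun i => (((tls.map (fun s => PySem.Str.len s)).take i).sum)))
        (tls.map (fun s => PySem.Str.len s)) k inner_w phase side_l side_r) acc
    = (ls.foldl (pvStepB inner_w phase side_l side_r)
        (acc, k - ((pre.map (fun s => PySem.Str.len s)).sum))).1 := by
  intro ls
  induction ls with
  | nil => intro pre _ acc; simp [PySem.List.enumerate]
  | cons x xs ih =>
    intro pre hpre acc
    rw [PySem.List.enumerate_cons, List.foldl_cons, List.foldl_cons]
    subst hpre
    rw [pv_step_eq pre x xs k inner_w phase side_l side_r acc]
    have hnext := ih (pre ++ [x]) (by simp) (pvStepA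
        ((List.range (((pre ++ x :: xs).map (fun s => PySem.Str.len s)).length + 1)).map
          (fun i => ((((pre ++ x :: xs).map (fun s => PySem.Str.len s)).take i).sum)))
        ((pre ++ x :: xs).map (fun s => PySem.Str.len s)) k inner_w phase side_l side_r
        acc ((pre.length : Int), x))
    rw [show (((pre ++ [x] : List String).length : Nat) : Int) = (pre.length : Int) + 1 by simp] at hnext
    rw [show (((pre ++ [x]).map (fun s => PySem.Str.len s)).sum)
        = ((pre.map (fun s => PySem.Str.len s)).sum) + PySem.Str.len x by simp [List.map_append]] at hnext
    rw [show k - ((pre.map (fun s => PySem.Str.len s)).sum) - PySem.Str.len x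
        = k - (((pre.map (fun s => PySem.Str.len s)).sum) + PySem.Str.len x) by ring]
    exact hnext

-- ===== VERDICT (by name: the statement is the Claim_ definition above) =====
theorem build_box_lines_spec : Claim_equal_build_box_lines := by
  intro w h_ text_lines inner_w phase reveal_chars _
  have h := pv_loop_eq text_lines
      (min reveal_chars ((text_lines.map (fun s => PySem.Str.len s)).sum)) inner_w phase
      (pv_make_border inner_w phase).2.1 (pv_make_border inner_w phase).2.2.1
      text_lines [] rfl [(pv_make_border inner_w phase).1]
  simp only [List.length_nil, Nat.cast_zero, List.map_nil, List.sum_nil, sub_zero] at h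
  unfold Spec_build_box_lines build_box_lines build_box_lines_alt
  simp only [pv_cum_eq, pv_total_eq]
  rw [h]
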